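-- pv_equiv track=rewrite | github.com/nikasakandelidze/algorithms | atoi/atoi.py | checkForDuplicateSigns
-- ===== SOURCE A (Python) =====
-- def checkForDuplicateSigns(s: str) -> bool:
--     seen = False
--     seenNumeric = False
--     for ch in s:
--         if ch == '-' or ch == '+':
--             if seen and not seenNumeric:
--                 return True
--             else:
--                 seen = True
--         elif ch.isnumeric():
--             seenNumeric = True
--     return False
-- ===== SOURCE B (Python) =====
-- def checkForDuplicateSigns(s: str) -> bool:
--     boundary = next((i for i, ch in enumerate(s) if ch.isnumeric()), len(s))
--     return sum(1 for ch in s[:boundary] if ch in '+-') >= 2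
-- ===== Notes on version B (the rewrite author's own statement) =====
-- stated objective: simpler
-- what changed: Replaced A's single interleaved scan with two mutable flags and an early return by a locate-then-count decomposition: find the index of the first numeric character, then return whether the prefix before it contains at least two sign characters.
import Mathlib
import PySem

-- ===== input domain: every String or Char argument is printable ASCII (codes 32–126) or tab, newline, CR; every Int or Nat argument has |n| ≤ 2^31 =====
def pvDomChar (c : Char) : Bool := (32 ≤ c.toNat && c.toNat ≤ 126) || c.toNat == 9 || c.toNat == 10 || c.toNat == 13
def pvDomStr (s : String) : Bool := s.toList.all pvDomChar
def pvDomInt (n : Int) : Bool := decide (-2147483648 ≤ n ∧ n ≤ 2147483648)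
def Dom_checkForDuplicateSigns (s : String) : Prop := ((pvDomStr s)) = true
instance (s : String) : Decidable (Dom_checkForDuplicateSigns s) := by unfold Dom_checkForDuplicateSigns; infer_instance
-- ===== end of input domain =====

-- B replaces A's interleaved two-flag early-return scan by locating the first digit and
-- counting sign characters in the prefix before it (objective: simpler decomposition).


-- ===== PORT A =====
-- A's for-loop with flags `seen`/`seenNumeric` and an early `return True`.
-- `ch.isnumeric()` is ported as PySem.Chars.isdigit, exact on the ASCII domain.
def chkLoop : List Char → Bool → Bool → Bool
  | [], _, _ => false
  | c :: cs, seen, seenNum =>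
    if c == '-' || c == '+' then
      (if seen && !seenNum then true else chkLoop cs true seenNum)
    else if PySem.Chars.isdigit c then chkLoop cs seen true
    else chkLoop cs seen seenNum

def checkForDuplicateSigns (s : String) : Bool :=
  chkLoop s.toList false false

-- ===== PORT B =====
-- boundary = index of the first digit (len(s) if none); count signs in s[:boundary].
-- `ch.isnumeric()` is ported as PySem.Chars.isdigit, exact on the ASCII domain.
def checkForDuplicateSigns_alt (s : String) : Bool :=
  decide (2 ≤ (s.toList.take ((s.toList.findIdx? PySem.Chars.isdigit).getD s.toList.length)).countP
                (fun c => c == '+' || c == '-'))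

-- ===== PRECONDITION & SPEC =====
def Spec_checkForDuplicateSigns (s : String) (out : Bool) : Prop := out = checkForDuplicateSigns_alt s
instance (s : String) (out : Bool) : Decidable (Spec_checkForDuplicateSigns s out) := by unfold Spec_checkForDuplicateSigns; infer_instance

-- ===== CLAIM (what is proved, stated in full; the proofs are below) =====
def Claim_equal_checkForDuplicateSigns : Prop := ∀ (s : String), Dom_checkForDuplicateSigns s → Spec_checkForDuplicateSigns s (checkForDuplicateSigns s)

-- ===== LEMMAS AND PROOFS =====

-- Once a numeric character has been seen, A's loop can never return True.
theorem chkLoop_seenNum_true (cs : List Char) : ∀ seen, chkLoop cs seen true = false := by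
  induction cs with
  | nil => intro seen; rfl
  | cons c cs ih =>
    intro seen
    simp only [chkLoop]
    split
    · simp [ih]
    · split <;> exact ih _

-- Characterisation of A's loop before any numeric character was seen:
-- it returns True iff the signs in the prefix before the first digit, plus the
-- one already seen (if any), number at least two.
theorem chkLoop_char (cs : List Char) : ∀ seen,
    chkLoop cs seen false =
      decide (2 ≤ (cs.takeWhile (fun c => !PySem.Chars.isdigit c)).countP
                    (fun c => c == '+' || c == '-') + (if seen then 1 else 0)) := by
  induction cs with
  | nil => intro seen; cases seen <;> simp [chkLoop]
  | cons c cs ih =>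
    intro seen
    simp only [chkLoop]
    by_cases hs : (c == '-' || c == '+') = true
    · have hd : PySem.Chars.isdigit c = false := by
        rcases Bool.or_eq_true_iff.mp hs with h | h <;> rw [eq_of_beq h] <;> decide
      have hp : (c == '+' || c == '-') = true := by
        rcases Bool.or_eq_true_iff.mp hs with h | h <;> rw [eq_of_beq h] <;> decide
      rw [if_pos hs]
      rw [show (c :: cs).takeWhile (fun x => !PySem.Chars.isdigit x)
            = c :: cs.takeWhile (fun x => !PySem.Chars.isdigit x) by
        simp [hd]]
      rw [List.countP_cons, hp]
      cases seen with
      | false =>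
        rw [if_neg (by simp)]
        rw [ih true]
        simp
      | true =>
        rw [if_pos (by simp)]
        symm
        rw [decide_eq_true_iff]
        split_ifs <;> first | omega | simp_all
    · rw [if_neg (by simp [hs])]
      by_cases hd : PySem.Chars.isdigit c = true
      · rw [if_pos hd, chkLoop_seenNum_true]
        rw [show (c :: cs).takeWhile (fun x => !PySem.Chars.isdigit x) = [] by
          simp [hd]]
        cases seen <;> simp
      · have hd' : PySem.Chars.isdigit c = false := by
          cases h : PySem.Chars.isdigit c
          · rfl
          · exact absurd h hd
        have hp : (c == '+' || c == '-') = false := by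
          rcases Bool.or_eq_false_iff.mp (Bool.eq_false_iff.mpr hs) with ⟨h1, h2⟩
          simp [h1, h2]
        rw [if_neg (by simp [hd'])]
        rw [show (c :: cs).takeWhile (fun x => !PySem.Chars.isdigit x)
              = c :: cs.takeWhile (fun x => !PySem.Chars.isdigit x) by
          simp [hd']]
        rw [List.countP_cons, hp]
        simpa using ih seen

-- B's take-up-to-the-first-digit equals takeWhile (not a digit).
theorem take_findIdx_eq_takeWhile (cs : List Char) :
    cs.take ((cs.findIdx? PySem.Chars.isdigit).getD cs.length) =
      cs.takeWhile (fun c => !PySem.Chars.isdigit c) := by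
  induction cs with
  | nil => rfl
  | cons c cs ih =>
    by_cases hd : PySem.Chars.isdigit c = true
    · simp [List.findIdx?_cons, hd]
    · have hd' : PySem.Chars.isdigit c = false := by
        cases h : PySem.Chars.isdigit c
        · rfl
        · exact absurd h hd
      simp only [List.findIdx?_cons, hd', List.takeWhile_cons, Bool.not_false]
      cases h : cs.findIdx? PySem.Chars.isdigit with
      | none => simpa [h, List.length_cons] using congrArg (List.cons c) (by simpa [h] using ih)
      | some i => simpa [h, List.take_succ_cons] using congrArg (List.cons c) (by simpa [h] using ih)

-- ===== VERDICT (by name: the statement is the Claim_ definition above) =====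
theorem checkForDuplicateSigns_spec : Claim_equal_checkForDuplicateSigns := by
  intro s _
  show checkForDuplicateSigns s = checkForDuplicateSigns_alt s
  unfold checkForDuplicateSigns checkForDuplicateSigns_alt
  rw [chkLoop_char, take_findIdx_eq_takeWhile]
  simp
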